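-- pv_equiv track=rewrite | github.com/rashadulrakib/short-text-stream-clustering | FastBtachGramClustering/clustering_gram_util.py | removeCommonTextIdsByCSize
-- ===== SOURCE A (Python) =====
-- def removeCommonTextIdsByCSize(dic_ngram__txtIds):
--     dic_removed_common__txtIds = {}
--
--     d1 = sorted(dic_ngram__txtIds, key=len)
--     keysByLength = list(d1)
--
--     ind = -1
--     txtId_clusterIndex = {}
--     for key in keysByLength:
--         ind += 1
--         txtIds = dic_ngram__txtIds[key]
--         notShared_txtIds = []  # notShared_txtIds in previous clusters
--
--         for txtId in txtIds:
--             if txtId not in txtId_clusterIndex: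
--                 notShared_txtIds.append(txtId)
--                 txtId_clusterIndex.setdefault(txtId, []).append(ind)
--                 continue
--             prevClusterIds = txtId_clusterIndex[txtId]
--             shared = False
--             for prevClusterId in prevClusterIds:
--                 if prevClusterId < ind:
--                     shared = True
--                     break
--             if not shared:
--                 notShared_txtIds.append(txtId)
--             txtId_clusterIndex.setdefault(txtId, []).append(ind)
--
--         if len(notShared_txtIds) > 0:
--             dic_removed_common__txtIds[key] = notShared_txtIds
--
--     return dic_removed_common__txtIds
-- ===== SOURCE B (Python) =====
-- def removeCommonTextIdsByCSize(dic_ngram__txtIds):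
--     seen = set()
--     result = {}
--     for key in sorted(dic_ngram__txtIds, key=len):
--         txtIds = dic_ngram__txtIds[key]
--         kept = [t for t in txtIds if t not in seen]
--         if kept:
--             result[key] = kept
--         seen.update(txtIds)
--     return result
-- ===== Notes on version B (the rewrite author's own statement) =====
-- stated objective: simpler
-- what changed: Replaces A's per-txtId dict of cluster-index lists and its inner scan over those lists with a single set of ids seen in strictly earlier clusters, updated once per cluster after the filter.
import Mathlib
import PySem

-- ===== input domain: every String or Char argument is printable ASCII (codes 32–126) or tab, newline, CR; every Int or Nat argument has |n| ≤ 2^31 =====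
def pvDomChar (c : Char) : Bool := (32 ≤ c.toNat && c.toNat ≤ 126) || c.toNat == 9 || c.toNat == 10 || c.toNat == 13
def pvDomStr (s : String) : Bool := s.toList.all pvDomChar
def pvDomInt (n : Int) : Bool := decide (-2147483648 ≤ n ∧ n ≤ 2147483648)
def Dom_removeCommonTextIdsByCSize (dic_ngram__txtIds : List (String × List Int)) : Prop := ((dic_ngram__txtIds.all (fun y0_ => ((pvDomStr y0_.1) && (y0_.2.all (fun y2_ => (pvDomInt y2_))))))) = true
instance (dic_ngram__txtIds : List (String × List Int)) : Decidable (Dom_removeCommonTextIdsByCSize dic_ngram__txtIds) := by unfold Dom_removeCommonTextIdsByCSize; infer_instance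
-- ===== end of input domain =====

-- B keeps one set of ids seen in strictly earlier clusters instead of A's per-id dict of
-- cluster-index lists with an inner scan; same return value, simpler bookkeeping.

-- ===== PORT A =====
-- the inner 'for prevClusterId in prevClusterIds: if prevClusterId < ind: shared = True; break'
def sharedLoop : List Int → Int → Bool
  | [], _ => false
  | p :: rest, ind => if p < ind then true else sharedLoop rest ind

-- the 'for txtId in txtIds' loop: state = (notShared_txtIds, txtId_clusterIndex)
def innerA (ind : Int) : List Int → PySem.Dict Int (List Int) → List Int → List Int × PySem.Dict Int (List Int)
  | [], tci, ns => (ns, tci)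
  | t :: rest, tci, ns =>
    match PySem.Dict.get? tci t with
    | none => innerA ind rest (tci.insert t [ind]) (ns ++ [t])
    | some prev =>
      innerA ind rest (tci.insert t (prev ++ [ind]))
        (if sharedLoop prev ind then ns else ns ++ [t])

-- the 'for key in keysByLength' loop: state = (ind, txtId_clusterIndex, dic_removed_common__txtIds)
def outerA (d : PySem.Dict String (List Int)) : List String → Int → PySem.Dict Int (List Int) →
    List (String × List Int) → List (String × List Int)
  | [], _, _, res => res
  | k :: rest, ind, tci, res =>
    let r := innerA (ind + 1) (d.getD k []) tci []
    outerA d rest (ind + 1) r.2 (if r.1.length > 0 then res ++ [(k, r.1)] else res)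

def removeCommonTextIdsByCSize (dic_ngram__txtIds : List (String × List Int)) : List (String × List Int) :=
  outerA (PySem.Dict.mk dic_ngram__txtIds)
    (PySem.List.sorted (dic_ngram__txtIds.map Prod.fst) (fun s => PySem.Str.len s) false)
    (-1) PySem.Dict.empty []

-- ===== PORT B =====
def removeCommonTextIdsByCSize_alt (dic_ngram__txtIds : List (String × List Int)) : List (String × List Int) :=
  let d := PySem.Dict.mk dic_ngram__txtIds
  ((PySem.List.sorted (dic_ngram__txtIds.map Prod.fst) (fun s => PySem.Str.len s) false).foldl
    (fun (st : PySem.Set Int × List (String × List Int)) k =>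
      let txtIds := d.getD k []
      let kept := txtIds.filter (fun t => !(PySem.Set.contains st.1 t))
      (PySem.Set.update st.1 txtIds,
       if kept.isEmpty then st.2 else st.2 ++ [(k, kept)]))
    (PySem.Set.empty, [])).2

-- ===== PRECONDITION & SPEC =====
def Spec_removeCommonTextIdsByCSize (dic_ngram__txtIds : List (String × List Int)) (out : List (String × List Int)) : Prop := out = removeCommonTextIdsByCSize_alt dic_ngram__txtIds
instance (dic_ngram__txtIds : List (String × List Int)) (out : List (String × List Int)) : Decidable (Spec_removeCommonTextIdsByCSize dic_ngram__txtIds out) := by unfold Spec_removeCommonTextIdsByCSize; infer_instance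

-- ===== CLAIM (what is proved, stated in full; the proofs are below) =====
def Claim_equal_removeCommonTextIdsByCSize : Prop := ∀ (dic_ngram__txtIds : List (String × List Int)), Dom_removeCommonTextIdsByCSize dic_ngram__txtIds → Spec_removeCommonTextIdsByCSize dic_ngram__txtIds (removeCommonTextIdsByCSize dic_ngram__txtIds)

-- ===== LEMMAS AND PROOFS =====

lemma sharedLoop_eq_any (l : List Int) (ind : Int) :
    sharedLoop l ind = l.any (fun x => decide (x < ind)) := by
  induction l with
  | nil => rfl
  | cons p rest ih => by_cases h : p < ind <;> simp [sharedLoop, h, ih]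

lemma innerA_spec (ind : Int) (seen : PySem.Set Int) :
    ∀ (txtIds : List Int) (tci : PySem.Dict Int (List Int)) (ns : List Int),
    (∀ t, ((PySem.Dict.get? tci t).getD []).any (fun x => decide (x < ind)) = PySem.Set.contains seen t) →
    (∀ t l, PySem.Dict.get? tci t = some l → l ≠ [] ∧ ∀ x ∈ l, x ≤ ind) →
    (innerA ind txtIds tci ns).1 = ns ++ txtIds.filter (fun t => !(PySem.Set.contains seen t))
    ∧ (∀ t l, PySem.Dict.get? (innerA ind txtIds tci ns).2 t = some l → l ≠ [] ∧ ∀ x ∈ l, x ≤ ind)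
    ∧ (∀ t, (PySem.Dict.get? (innerA ind txtIds tci ns).2 t).isSome
          = ((PySem.Dict.get? tci t).isSome || decide (t ∈ txtIds))) := by
  intro txtIds
  induction txtIds with
  | nil =>
    intro tci ns H Hb
    exact ⟨by simp [innerA], fun t l h => Hb t l h, fun t => by simp [innerA]⟩
  | cons t rest ih =>
    intro tci ns H Hb
    cases hg : PySem.Dict.get? tci t with
    | none =>
      have hc : PySem.Set.contains seen t = false := by
        have := H t; rw [hg] at this; simpa using this.symm
      have H' : ∀ t', ((PySem.Dict.get? (tci.insert t [ind]) t').getD []).any (fun x => decide (x < ind)) = PySem.Set.contains seen t' := by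
        intro t'
        rw [PySem.Dict.get?_insert tci t t' [ind]]
        by_cases ht : t' = t
        · subst ht
          simpa using hc.symm
        · rw [if_neg ht]; exact H t'
      have Hb' : ∀ t' l, PySem.Dict.get? (tci.insert t [ind]) t' = some l → l ≠ [] ∧ ∀ x ∈ l, x ≤ ind := by
        intro t' l h
        rw [PySem.Dict.get?_insert tci t t' [ind]] at h
        by_cases ht : t' = t
        · rw [if_pos ht] at h
          cases h; exact ⟨by simp, by simp⟩
        · rw [if_neg ht] at h; exact Hb t' l h
      obtain ⟨h1, h2, h3⟩ := ih (tci.insert t [ind]) (ns ++ [t]) H' Hb'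
      refine ⟨?_, ?_, ?_⟩
      · simp only [innerA, hg]
        rw [h1, List.filter_cons, hc]
        simp
      · intro t' l h
        simp only [innerA, hg] at h ⊢
        exact h2 t' l h
      · intro t'
        simp only [innerA, hg]
        rw [h3 t', PySem.Dict.get?_insert tci t t' [ind]]
        by_cases ht : t' = t
        · subst ht; simp
        · simp [ht]
    | some prev =>
      have hsh : sharedLoop prev ind = PySem.Set.contains seen t := by
        rw [sharedLoop_eq_any]
        have := H t; rw [hg] at this; simpa using this
      have H' : ∀ t', ((PySem.Dict.get? (tci.insert t (prev ++ [ind])) t').getD []).any (fun x => decide (x < ind)) = PySem.Set.contains seen t' := by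
        intro t'
        rw [PySem.Dict.get?_insert tci t t' (prev ++ [ind])]
        by_cases ht : t' = t
        · subst ht
          have hH := H t'; rw [hg] at hH
          simp only [Option.getD_some] at hH
          simpa using hH
        · rw [if_neg ht]; exact H t'
      have Hb' : ∀ t' l, PySem.Dict.get? (tci.insert t (prev ++ [ind])) t' = some l → l ≠ [] ∧ ∀ x ∈ l, x ≤ ind := by
        intro t' l h
        rw [PySem.Dict.get?_insert tci t t' (prev ++ [ind])] at h
        by_cases ht : t' = t
        · rw [if_pos ht] at h
          cases h
          refine ⟨by simp, ?_⟩
          intro x hx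
          rcases List.mem_append.1 hx with hx | hx
          · exact (Hb t prev hg).2 x hx
          · simp at hx; omega
        · rw [if_neg ht] at h; exact Hb t' l h
      obtain ⟨h1, h2, h3⟩ := ih (tci.insert t (prev ++ [ind]))
        (if sharedLoop prev ind then ns else ns ++ [t]) H' Hb'
      refine ⟨?_, ?_, ?_⟩
      · simp only [innerA, hg]
        rw [h1, hsh, List.filter_cons]
        cases hc : PySem.Set.contains seen t <;> simp
      · intro t' l h
        simp only [innerA, hg] at h ⊢
        exact h2 t' l h
      · intro t'
        simp only [innerA, hg]
        rw [h3 t', PySem.Dict.get?_insert tci t t' (prev ++ [ind])]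
        by_cases ht : t' = t
        · subst ht; simp [hg]
        · simp [ht]

lemma outerA_eq_foldl (d : PySem.Dict String (List Int)) :
    ∀ (keys : List String) (ind : Int) (tci : PySem.Dict Int (List Int))
      (seen : PySem.Set Int) (res : List (String × List Int)),
    (∀ t, PySem.Set.contains seen t = (PySem.Dict.get? tci t).isSome) →
    (∀ t l, PySem.Dict.get? tci t = some l → l ≠ [] ∧ ∀ x ∈ l, x ≤ ind) →
    outerA d keys ind tci res =
      (keys.foldl
        (fun (st : PySem.Set Int × List (String × List Int)) k =>
          let txtIds := d.getD k []
          let kept := txtIds.filter (fun t => !(PySem.Set.contains st.1 t))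
          (PySem.Set.update st.1 txtIds,
           if kept.isEmpty then st.2 else st.2 ++ [(k, kept)]))
        (seen, res)).2 := by
  intro keys
  induction keys with
  | nil => intro ind tci seen res Hs Hb; simp [outerA]
  | cons k rest ih =>
    intro ind tci seen res Hs Hb
    have H : ∀ t, ((PySem.Dict.get? tci t).getD []).any (fun x => decide (x < ind + 1)) = PySem.Set.contains seen t := by
      intro t
      rw [Hs t]
      cases hg : PySem.Dict.get? tci t with
      | none => simp
      | some l =>
        obtain ⟨hne, hle⟩ := Hb t l hg
        cases l with
        | nil => exact absurd rfl hne
        | cons x xs =>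
          simp only [Option.getD_some, List.any_cons, Option.isSome_some, Bool.or_eq_true,
            decide_eq_true_eq]
          exact Or.inl (by have := hle x (by simp); omega)
    have Hb1 : ∀ t l, PySem.Dict.get? tci t = some l → l ≠ [] ∧ ∀ x ∈ l, x ≤ ind + 1 := by
      intro t l h
      obtain ⟨hne, hle⟩ := Hb t l h
      exact ⟨hne, fun x hx => by have := hle x hx; omega⟩
    obtain ⟨h1, h2, h3⟩ := innerA_spec (ind + 1) seen (d.getD k []) tci [] H Hb1
    simp only [outerA, List.foldl_cons]
    have hres : (if (innerA (ind + 1) (d.getD k []) tci []).1.length > 0 then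
          res ++ [(k, (innerA (ind + 1) (d.getD k []) tci []).1)] else res)
        = (if ((d.getD k []).filter (fun t => !(PySem.Set.contains seen t))).isEmpty then res
           else res ++ [(k, (d.getD k []).filter (fun t => !(PySem.Set.contains seen t)))]) := by
      rw [h1, List.nil_append]
      rcases hk : (d.getD k []).filter (fun t => !(PySem.Set.contains seen t)) with _ | ⟨y, ys⟩ <;> simp
    rw [hres]
    exact ih (ind + 1) (innerA (ind + 1) (d.getD k []) tci []).2
      (PySem.Set.update seen (d.getD k [])) _
      (fun t => by
        rw [h3 t, ← Hs t]
        simp [pysem, PySem.Set.mem_update])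
      h2

-- ===== VERDICT (by name: the statement is the Claim_ definition above) =====
theorem removeCommonTextIdsByCSize_spec : Claim_equal_removeCommonTextIdsByCSize := by
  intro dic _
  unfold Spec_removeCommonTextIdsByCSize removeCommonTextIdsByCSize removeCommonTextIdsByCSize_alt
  rw [outerA_eq_foldl]
  · intro t; simp [PySem.Dict.get?_empty, PySem.Set.contains]
  · intro t l h; simp [PySem.Dict.get?_empty] at h
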